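-- pv_equiv track=rewrite | github.com/jhonatanGe146/Python | Python/Cadenas/Ejercicio1.py | cont_letra
-- ===== SOURCE A (Python) =====
-- def cont_letra (cad):
--     l=[]
--     cont=0
--     cadena=cad.lower()
--     for i in cadena:
--         ver= i.isalpha()
--         if ver != False:
--             if i not in l:
--                 l.append(i)
--                 cont+=1
--     return cont
-- ===== SOURCE B (Python) =====
-- def cont_letra(cad):
--     letras = sorted(c for c in cad.lower() if c.isalpha())
--     if not letras:
--         return 0
--     cont = 1
--     prev = letras[0]
--     for c in letras[1:]:
--         if c != prev:
--             cont += 1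
--         prev = c
--     return cont
-- ===== Notes on version B (the rewrite author's own statement) =====
-- stated objective: alternative
-- what changed: B replaces A's membership-test accumulator list (linear scan per character) by sort-then-scan: filter the alphabetic characters of cad.lower(), sort them, and count positions that differ from their predecessor.
import Mathlib
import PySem

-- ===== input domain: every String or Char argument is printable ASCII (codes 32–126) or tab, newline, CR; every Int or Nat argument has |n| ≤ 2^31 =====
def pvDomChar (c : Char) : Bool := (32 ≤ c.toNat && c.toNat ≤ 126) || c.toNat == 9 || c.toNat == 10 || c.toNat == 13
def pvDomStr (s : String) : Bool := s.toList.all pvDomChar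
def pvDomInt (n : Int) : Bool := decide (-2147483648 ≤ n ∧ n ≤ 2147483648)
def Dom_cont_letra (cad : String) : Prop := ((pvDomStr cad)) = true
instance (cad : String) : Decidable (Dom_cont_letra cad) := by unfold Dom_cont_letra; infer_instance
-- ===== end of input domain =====

-- B counts distinct alphabetic characters by sort-then-scan instead of A's membership-test accumulator list; alternative decomposition, same result.

-- ===== PORT A =====
def cont_letra (cad : String) : Int :=
  let cadena := PySem.Str.lower cad
  (cadena.toList.foldl (fun (st : List Char × Int) i =>
      let ver := PySem.Chars.isalpha i
      if ver ≠ false then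
        if i ∉ st.1 then (st.1 ++ [i], st.2 + 1) else st
      else st) ([], 0)).2

-- ===== PORT B =====
def cont_letra_alt (cad : String) : Int :=
  let letras := PySem.List.sorted ((PySem.Str.lower cad).toList.filter (fun c => PySem.Chars.isalpha c)) (fun x => x) false
  match letras with
  | [] => 0
  | p :: rest =>
    (rest.foldl (fun (st : Char × Int) c =>
        if c ≠ st.1 then (c, st.2 + 1) else (c, st.2)) (p, 1)).2

-- ===== PRECONDITION & SPEC =====
def Spec_cont_letra (cad : String) (out : Int) : Prop := out = cont_letra_alt cad
instance (cad : String) (out : Int) : Decidable (Spec_cont_letra cad out) := by unfold Spec_cont_letra; infer_instance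

-- ===== CLAIM (what is proved, stated in full; the proofs are below) =====
def Claim_equal_cont_letra : Prop := ∀ (cad : String), Dom_cont_letra cad → Spec_cont_letra cad (cont_letra cad)

-- ===== LEMMAS AND PROOFS =====

-- A's loop: the counter counts the new distinct alphabetic characters.
theorem contA_foldl (xs : List Char) : ∀ (l : List Char) (cont : Int),
    (xs.foldl (fun (st : List Char × Int) i =>
      let ver := PySem.Chars.isalpha i
      if ver ≠ false then
        if i ∉ st.1 then (st.1 ++ [i], st.2 + 1) else st
      else st) (l, cont)).2
    = cont + ((xs.filter (fun c => PySem.Chars.isalpha c)).toFinset \ l.toFinset).card := by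
  induction xs with
  | nil => intro l cont; simp
  | cons i t ih =>
    intro l cont
    simp only [List.foldl_cons, List.filter_cons]
    by_cases hα : PySem.Chars.isalpha i = true
    · simp only [hα, if_pos, ne_eq, Bool.true_eq_false, not_false_eq_true]
      by_cases hm : i ∈ l
      · simp only [hm, not_true_eq_false, if_false, ih]
        congr 2
        rw [List.toFinset_cons]
        rw [Finset.insert_sdiff_of_mem _ (by simpa using hm)]
      · simp only [hm, not_false_eq_true, if_true, ih]
        have h1 : (l ++ [i]).toFinset = insert i l.toFinset := by
          simp [List.toFinset_append]
        rw [h1, List.toFinset_cons]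
        have h2 : insert i (t.filter (fun c => PySem.Chars.isalpha c)).toFinset \ l.toFinset
            = insert i ((t.filter (fun c => PySem.Chars.isalpha c)).toFinset \ insert i l.toFinset) := by
          ext x
          simp only [Finset.mem_sdiff, Finset.mem_insert]
          constructor
          · rintro ⟨hx | hx, hnl⟩
            · exact Or.inl hx
            · by_cases hxi : x = i
              · exact Or.inl hxi
              · exact Or.inr ⟨hx, by push Not; exact ⟨hxi, hnl⟩⟩
          · rintro (hx | ⟨hx, hni⟩)
            · exact ⟨Or.inl hx, by simpa [hx] using (by simpa using hm : i ∉ l.toFinset)⟩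
            · push Not at hni
              exact ⟨Or.inr hx, hni.2⟩
        rw [h2, Finset.card_insert_of_notMem (by simp)]
        push_cast
        ring
    · have hα' : PySem.Chars.isalpha i = false := by simpa using hα
      simp only [hα', ne_eq, not_true_eq_false, if_false]
      exact ih l cont

-- B's scan on a sorted tail counts the distinct values of prev :: rest, minus one (for prev itself).
theorem contB_foldl (rest : List Char) : ∀ (prev : Char) (cont : Int),
    rest.Pairwise (· ≤ ·) → (∀ x ∈ rest, prev ≤ x) →
    (rest.foldl (fun (st : Char × Int) c =>
        if c ≠ st.1 then (c, st.2 + 1) else (c, st.2)) (prev, cont)).2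
    = cont + ((insert prev rest.toFinset).card - 1 : Int) := by
  induction rest with
  | nil => intro prev cont _ _; simp
  | cons c t ih =>
    intro prev cont hp hge
    have hpt : t.Pairwise (· ≤ ·) := hp.of_cons
    have hct : ∀ x ∈ t, c ≤ x := fun x hx => (List.pairwise_cons.mp hp).1 x hx
    simp only [List.foldl_cons]
    by_cases hcp : c = prev
    · simp only [hcp, ne_eq, not_true_eq_false, if_false]
      rw [ih prev cont hpt (by simpa [hcp] using hct)]
      rw [List.toFinset_cons, Finset.insert_idem]
    · simp only [ne_eq, hcp, not_false_eq_true, if_true]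
      rw [ih c (cont + 1) hpt hct]
      have hpc : prev ≤ c := hge c (List.mem_cons_self ..)
      have hpnot : prev ∉ insert c t.toFinset := by
        simp only [Finset.mem_insert, List.mem_toFinset]
        rintro (h | h)
        · exact hcp h.symm
        · exact hcp (le_antisymm (hct prev h) hpc)
      rw [List.toFinset_cons, Finset.card_insert_of_notMem hpnot]
      push_cast
      ring

-- Evaluation of each port as the number of distinct alphabetic characters.
theorem cont_letra_eq (cad : String) :
    cont_letra cad = (((PySem.Str.lower cad).toList.filter (fun c => PySem.Chars.isalpha c)).toFinset.card : Int) := by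
  have h := contA_foldl (PySem.Str.lower cad).toList [] 0
  simpa [cont_letra] using h

theorem cont_letra_alt_eq (cad : String) :
    cont_letra_alt cad = (((PySem.Str.lower cad).toList.filter (fun c => PySem.Chars.isalpha c)).toFinset.card : Int) := by
  have hperm : (PySem.List.sorted ((PySem.Str.lower cad).toList.filter (fun c => PySem.Chars.isalpha c)) (fun x => x) false).Perm
      ((PySem.Str.lower cad).toList.filter (fun c => PySem.Chars.isalpha c)) := PySem.List.sorted_perm ..
  have hpw : (PySem.List.sorted ((PySem.Str.lower cad).toList.filter (fun c => PySem.Chars.isalpha c)) (fun x => x) false).Pairwise (· ≤ ·) := by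
    simpa using PySem.List.sorted_pairwise ((PySem.Str.lower cad).toList.filter (fun c => PySem.Chars.isalpha c)) (fun x => x)
  have hfin := List.toFinset_eq_of_perm _ _ hperm
  simp only [cont_letra_alt]
  cases hs : PySem.List.sorted ((PySem.Str.lower cad).toList.filter (fun c => PySem.Chars.isalpha c)) (fun x => x) false with
  | nil =>
    rw [hs] at hperm
    have h0 : ((PySem.Str.lower cad).toList.filter (fun c => PySem.Chars.isalpha c)) = [] := hperm.symm.eq_nil
    rw [h0]
    simp
  | cons p rest =>
    rw [hs] at hpw hfin
    have hB := contB_foldl rest p 1 hpw.of_cons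
      (fun x hx => (List.pairwise_cons.mp hpw).1 x hx)
    simp only []
    rw [hB, ← List.toFinset_cons, hfin]
    ring

-- ===== VERDICT (by name: the statement is the Claim_ definition above) =====
theorem cont_letra_spec : Claim_equal_cont_letra := by
  intro cad _
  unfold Spec_cont_letra
  rw [cont_letra_eq, cont_letra_alt_eq]
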